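-- pv_equiv track=rewrite | github.com/EvgeniiChichin/yandex-disk-app | disk/filter_files_by_type.py | filter_files_by_type
-- ===== SOURCE A (Python) =====
-- def filter_files_by_type(files_data, media_type):
--     """Фильтрует файлы по типу медиа."""
--     filtered_files = []
--     for file in files_data:
--         mime_type = file.get('mime_type', '')
--         if media_type == 'all':
--             filtered_files.append(file)
--         elif media_type == 'document' and mime_type.startswith('application/'):
--             filtered_files.append(file)
--         elif media_type == 'image' and mime_type.startswith('image/'):
--             filtered_files.append(file)
--         elif media_type == 'video' and mime_type.startswith('video/'):
--             filtered_files.append(file)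
--         elif media_type == 'audio' and mime_type.startswith('audio/'):
--             filtered_files.append(file)
--         elif media_type == 'archive' and (mime_type.startswith('application/zip') or
--                                           mime_type.startswith('application/x-rar-compressed')):
--             filtered_files.append(file)
--     return filtered_files
-- ===== SOURCE B (Python) =====
-- def _labels(mime_type):
--     """Media-type labels a MIME string belongs to, derived by splitting it
--     into major/minor parts rather than prefix-matching against a chosen type."""
--     major, sep, minor = mime_type.partition('/')
--     if not sep:
--         return []
--     if major in ('image', 'video', 'audio'):
--         return [major]
--     if major == 'application':
--         if minor.startswith('zip') or minor.startswith('x-rar-compressed'):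
--             return ['document', 'archive']
--         return ['document']
--     return []
--
--
-- def filter_files_by_type(files_data, media_type):
--     """Фильтрует файлы по типу медиа."""
--     if media_type == 'all':
--         return list(files_data)
--     return [f for f in files_data
--             if media_type in _labels(f.get('mime_type', ''))]
-- ===== Notes on version B (the rewrite author's own statement) =====
-- stated objective: alternative
-- what changed: Instead of prefix-matching the mime string against a cascade keyed by media_type, B parses each mime string once into major/minor parts and classifies it into its list of media-type labels, then filters by membership of media_type in those labels ('all' returns a copy).
import Mathlib
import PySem

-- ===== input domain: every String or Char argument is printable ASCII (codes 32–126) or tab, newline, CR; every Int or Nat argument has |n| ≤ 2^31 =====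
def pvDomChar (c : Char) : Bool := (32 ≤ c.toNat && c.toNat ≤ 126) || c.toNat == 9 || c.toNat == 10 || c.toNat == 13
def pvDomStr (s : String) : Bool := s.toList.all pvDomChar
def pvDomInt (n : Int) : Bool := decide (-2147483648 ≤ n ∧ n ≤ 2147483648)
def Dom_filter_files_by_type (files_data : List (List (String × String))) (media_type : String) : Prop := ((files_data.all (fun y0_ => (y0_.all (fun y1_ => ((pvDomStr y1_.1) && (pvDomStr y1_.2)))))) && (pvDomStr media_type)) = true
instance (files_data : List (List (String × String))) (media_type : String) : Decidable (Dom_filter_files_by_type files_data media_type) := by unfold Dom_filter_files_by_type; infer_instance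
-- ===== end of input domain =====

-- B parses each mime string once into major/minor parts and classifies it into its list of
-- media-type labels, then filters by membership (objective: alternative; same cost).

-- ===== PORT A =====
-- file.get('mime_type', '') : first-match association-list lookup with default
def filter_files_by_type (files_data : List (List (String × String))) (media_type : String) : List (List (String × String)) :=
  files_data.foldl (fun filtered_files file =>
    let mime_type := (PySem.Dict.mk file).getD "mime_type" ""
    if media_type == "all" then filtered_files ++ [file]
    else if media_type == "document" && PySem.Str.startswith mime_type "application/" then filtered_files ++ [file]
    else if media_type == "image" && PySem.Str.startswith mime_type "image/" then filtered_files ++ [file]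
    else if media_type == "video" && PySem.Str.startswith mime_type "video/" then filtered_files ++ [file]
    else if media_type == "audio" && PySem.Str.startswith mime_type "audio/" then filtered_files ++ [file]
    else if media_type == "archive" && (PySem.Str.startswith mime_type "application/zip" ||
                                        PySem.Str.startswith mime_type "application/x-rar-compressed") then filtered_files ++ [file]
    else filtered_files) []

-- ===== PORT B =====
-- mime_type.partition('/') is ported by hand (exact for the one-char separator '/'):
-- major = the chars before the first '/', and the match distinguishes "no separator"
-- ([]) from "separator found" (the '/' followed by minor).
def labelsB (mime_type : String) : List String :=
  let cs := mime_type.toList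
  let major := cs.takeWhile (fun c => c != '/')
  match cs.dropWhile (fun c => c != '/') with
  | [] => []
  | _ :: minor =>
    if major = "image".toList ∨ major = "video".toList ∨ major = "audio".toList then
      [String.ofList major]
    else if major = "application".toList then
      if PySem.Chars.startswith minor "zip".toList ||
         PySem.Chars.startswith minor "x-rar-compressed".toList then
        ["document", "archive"]
      else ["document"]
    else []

def filter_files_by_type_alt (files_data : List (List (String × String))) (media_type : String) : List (List (String × String)) :=
  if media_type == "all" then files_data
  else files_data.filter (fun f =>
    (labelsB ((PySem.Dict.mk f).getD "mime_type" "")).contains media_type)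

-- ===== PRECONDITION & SPEC =====
def Spec_filter_files_by_type (files_data : List (List (String × String))) (media_type : String) (out : List (List (String × String))) : Prop := out = filter_files_by_type_alt files_data media_type
instance (files_data : List (List (String × String))) (media_type : String) (out : List (List (String × String))) : Decidable (Spec_filter_files_by_type files_data media_type out) := by unfold Spec_filter_files_by_type; infer_instance

-- ===== CLAIM (what is proved, stated in full; the proofs are below) =====
def Claim_equal_filter_files_by_type : Prop := ∀ (files_data : List (List (String × String))) (media_type : String), Dom_filter_files_by_type files_data media_type → Spec_filter_files_by_type files_data media_type (filter_files_by_type files_data media_type)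

-- ===== LEMMAS AND PROOFS =====

-- splitting a list of chars at the first '/'
theorem take_drop_slash (w t : List Char) (hw : ∀ c ∈ w, c ≠ '/') :
    (w ++ '/' :: t).takeWhile (fun c => c != '/') = w ∧
    (w ++ '/' :: t).dropWhile (fun c => c != '/') = '/' :: t := by
  induction w with
  | nil => simp
  | cons c w ih =>
    have hc : c ≠ '/' := hw c (by simp)
    have := ih (fun d hd => hw d (by simp [hd]))
    simp [hc, this.1, this.2]

theorem span_slash (cs : List Char) (h : cs.dropWhile (fun c => c != '/') ≠ []) :
    cs = cs.takeWhile (fun c => c != '/') ++ '/' :: (cs.dropWhile (fun c => c != '/')).tail := by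
  have h1 := List.takeWhile_append_dropWhile (p := fun c => c != '/') (l := cs)
  have h2 := List.head_dropWhile_not (p := fun c => c != '/') (l := cs) h
  have h3 : (cs.dropWhile (fun c => c != '/')).head h = '/' := by simpa using h2
  have h4 : '/' :: (cs.dropWhile (fun c => c != '/')).tail = cs.dropWhile (fun c => c != '/') := by
    cases hq : cs.dropWhile (fun c => c != '/') with
    | nil => exact absurd hq h
    | cons d q => simp only [List.tail_cons]; rw [← h3]; simp [hq]
  conv_lhs => rw [← h1]
  rw [h4]

theorem labels_major_aux (m w : String)
    (hw : '/' ∉ w.toList)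
    (hcond : w.toList = "image".toList ∨ w.toList = "video".toList ∨ w.toList = "audio".toList)
    (hne1 : w ≠ "document") (hne2 : w ≠ "archive") :
    (labelsB m).contains w = PySem.Str.startswith m (w ++ "/") := by
  have hts : (w ++ "/").toList = w.toList ++ ['/'] := by simp
  by_cases hpre : (w.toList ++ ['/']) <+: m.toList
  · obtain ⟨r, hr⟩ := hpre
    have hm : m.toList = w.toList ++ '/' :: r := by
      rw [← hr]; simp
    have htd := take_drop_slash w.toList r (fun c hc heq => hw (heq ▸ hc))
    have hsw : PySem.Str.startswith m (w ++ "/") = true := by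
      rw [PySem.Str.startswith_eq, PySem.Chars.startswith_iff, hts, hm]
      exact ⟨r, by simp⟩
    rw [hsw]
    have hlab : labelsB m = [String.ofList w.toList] := by
      unfold labelsB
      simp only [hm, htd.1, htd.2]
      rw [if_pos hcond]
    rw [hlab]
    simp
  · have hsw : PySem.Str.startswith m (w ++ "/") = false := by
      rw [Bool.eq_false_iff]
      intro hx
      rw [PySem.Str.startswith_eq, PySem.Chars.startswith_iff, hts] at hx
      exact hpre hx
    rw [hsw, Bool.eq_false_iff]
    intro hc
    have hmem : w ∈ labelsB m := by simpa using hc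
    cases hq : m.toList.dropWhile (fun c => c != '/') with
    | nil => unfold labelsB at hmem; simp [hq] at hmem
    | cons d q =>
      have hcs := span_slash m.toList (by simp [hq])
      rw [hq] at hcs; simp only [List.tail_cons] at hcs
      unfold labelsB at hmem
      simp only [hq] at hmem
      by_cases h1 : m.toList.takeWhile (fun c => c != '/') = "image".toList ∨
                    m.toList.takeWhile (fun c => c != '/') = "video".toList ∨
                    m.toList.takeWhile (fun c => c != '/') = "audio".toList
      · rw [if_pos h1] at hmem
        simp only [List.mem_singleton] at hmem
        have hmaj : m.toList.takeWhile (fun c => c != '/') = w.toList := by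
          rw [hmem]; simp
        rw [hmaj] at hcs
        exact hpre ⟨q, by rw [hcs]; simp⟩
      · rw [if_neg h1] at hmem
        by_cases h2 : m.toList.takeWhile (fun c => c != '/') = "application".toList
        · rw [if_pos h2] at hmem
          split_ifs at hmem <;> simp at hmem <;>
            first
            | (rcases hmem with h | h; exact hne1 h; exact hne2 h)
            | exact hne1 hmem
        · rw [if_neg h2] at hmem; simp at hmem

theorem labels_image (m : String) :
    (labelsB m).contains "image" = PySem.Str.startswith m "image/" :=
  labels_major_aux m "image" (by simp) (by simp) (by simp) (by simp)

theorem labels_video (m : String) :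
    (labelsB m).contains "video" = PySem.Str.startswith m "video/" :=
  labels_major_aux m "video" (by simp) (by simp) (by simp) (by simp)

theorem labels_audio (m : String) :
    (labelsB m).contains "audio" = PySem.Str.startswith m "audio/" :=
  labels_major_aux m "audio" (by simp) (by simp) (by simp) (by simp)

theorem labels_document (m : String) :
    (labelsB m).contains "document" = PySem.Str.startswith m "application/" := by
  by_cases hpre : ("application".toList ++ ['/']) <+: m.toList
  · obtain ⟨r, hr⟩ := hpre
    have hm : m.toList = "application".toList ++ '/' :: r := by rw [← hr]; simp
    have htd := take_drop_slash "application".toList r (by intro c hc h; subst h; simp at hc)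
    have hsw : PySem.Str.startswith m "application/" = true := by
      rw [PySem.Str.startswith_eq, PySem.Chars.startswith_iff, hm]
      exact ⟨r, by simp [show ("application/".toList : List Char) = "application".toList ++ ['/'] by simp]⟩
    rw [hsw]
    unfold labelsB
    simp only [hm, htd.1, htd.2]
    split_ifs <;> simp_all
  · have hsw : PySem.Str.startswith m "application/" = false := by
      rw [Bool.eq_false_iff]
      intro hx
      rw [PySem.Str.startswith_eq, PySem.Chars.startswith_iff] at hx
      exact hpre (by simpa [show ("application/".toList : List Char) = "application".toList ++ ['/'] by simp] using hx)
    rw [hsw, Bool.eq_false_iff]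
    intro hc
    have hmem : "document" ∈ labelsB m := by simpa using hc
    cases hq : m.toList.dropWhile (fun c => c != '/') with
    | nil => unfold labelsB at hmem; simp [hq] at hmem
    | cons d q =>
      have hcs := span_slash m.toList (by simp [hq])
      rw [hq] at hcs; simp only [List.tail_cons] at hcs
      unfold labelsB at hmem
      simp only [hq] at hmem
      by_cases h1 : m.toList.takeWhile (fun c => c != '/') = "image".toList ∨
                    m.toList.takeWhile (fun c => c != '/') = "video".toList ∨
                    m.toList.takeWhile (fun c => c != '/') = "audio".toList
      · rw [if_pos h1] at hmem
        simp only [List.mem_singleton] at hmem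
        rcases h1 with h | h | h <;> rw [h] at hmem <;> simp at hmem
      · rw [if_neg h1] at hmem
        by_cases h2 : m.toList.takeWhile (fun c => c != '/') = "application".toList
        · rw [h2] at hcs
          exact hpre ⟨q, by rw [hcs]; simp⟩
        · rw [if_neg h2] at hmem; simp at hmem

theorem labels_archive (m : String) :
    (labelsB m).contains "archive" =
      (PySem.Str.startswith m "application/zip" ||
       PySem.Str.startswith m "application/x-rar-compressed") := by
  by_cases hpre : ("application".toList ++ ['/']) <+: m.toList
  · obtain ⟨r, hr⟩ := hpre
    have hm : m.toList = "application".toList ++ '/' :: r := by rw [← hr]; simp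
    have hm' : m.toList = "application/".toList ++ r := by
      rw [hm, show ("application/".toList : List Char) = "application".toList ++ ['/'] by simp]
      simp
    have htd := take_drop_slash "application".toList r (by intro c hc h; subst h; simp at hc)
    have e1 : PySem.Str.startswith m "application/zip" = PySem.Chars.startswith r "zip".toList := by
      rw [PySem.Str.startswith_eq, Bool.eq_iff_iff, PySem.Chars.startswith_iff,
        PySem.Chars.startswith_iff, hm',
        show ("application/zip".toList : List Char) = "application/".toList ++ "zip".toList by simp]
      exact ⟨fun h => (List.prefix_append_right_inj _).mp h,
             fun h => (List.prefix_append_right_inj _).mpr h⟩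
    have e2 : PySem.Str.startswith m "application/x-rar-compressed" =
        PySem.Chars.startswith r "x-rar-compressed".toList := by
      rw [PySem.Str.startswith_eq, Bool.eq_iff_iff, PySem.Chars.startswith_iff,
        PySem.Chars.startswith_iff, hm',
        show ("application/x-rar-compressed".toList : List Char) =
          "application/".toList ++ "x-rar-compressed".toList by simp]
      exact ⟨fun h => (List.prefix_append_right_inj _).mp h,
             fun h => (List.prefix_append_right_inj _).mpr h⟩
    rw [e1, e2]
    unfold labelsB
    simp only [hm, htd.1, htd.2]
    split_ifs <;> simp_all
  · have hz : PySem.Str.startswith m "application/zip" = false := by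
      rw [Bool.eq_false_iff]
      intro hx
      rw [PySem.Str.startswith_eq, PySem.Chars.startswith_iff] at hx
      exact hpre (List.IsPrefix.trans (by simp) hx)
    have hx : PySem.Str.startswith m "application/x-rar-compressed" = false := by
      rw [Bool.eq_false_iff]
      intro hx
      rw [PySem.Str.startswith_eq, PySem.Chars.startswith_iff] at hx
      exact hpre (List.IsPrefix.trans (by simp) hx)
    rw [hz, hx, Bool.or_self, Bool.eq_false_iff]
    intro hc
    have hmem : "archive" ∈ labelsB m := by simpa using hc
    cases hq : m.toList.dropWhile (fun c => c != '/') with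
    | nil => unfold labelsB at hmem; simp [hq] at hmem
    | cons d q =>
      have hcs := span_slash m.toList (by simp [hq])
      rw [hq] at hcs; simp only [List.tail_cons] at hcs
      unfold labelsB at hmem
      simp only [hq] at hmem
      by_cases h1 : m.toList.takeWhile (fun c => c != '/') = "image".toList ∨
                    m.toList.takeWhile (fun c => c != '/') = "video".toList ∨
                    m.toList.takeWhile (fun c => c != '/') = "audio".toList
      · rw [if_pos h1] at hmem
        simp only [List.mem_singleton] at hmem
        rcases h1 with h | h | h <;> rw [h] at hmem <;> simp at hmem
      · rw [if_neg h1] at hmem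
        by_cases h2 : m.toList.takeWhile (fun c => c != '/') = "application".toList
        · rw [h2] at hcs
          exact hpre ⟨q, by rw [hcs]; simp⟩
        · rw [if_neg h2] at hmem; simp at hmem

theorem labels_subset (m : String) (x : String) (hx : x ∈ labelsB m) :
    x = "image" ∨ x = "video" ∨ x = "audio" ∨ x = "document" ∨ x = "archive" := by
  unfold labelsB at hx
  cases hq : m.toList.dropWhile (fun c => c != '/') with
  | nil => simp [hq] at hx
  | cons d q =>
    simp only [hq] at hx
    split_ifs at hx with h1 h2 h3
    · rcases h1 with h | h | h <;> simp [h] at hx <;> simp [hx]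
    · simp at hx; rcases hx with h | h <;> simp [h]
    · simp at hx; simp [hx]
    · simp at hx

theorem filter_eq (files_data : List (List (String × String))) (media_type : String) :
    filter_files_by_type files_data media_type = filter_files_by_type_alt files_data media_type := by
  by_cases h1 : media_type = "all"
  · subst h1
    simp only [filter_files_by_type, filter_files_by_type_alt, BEq.rfl, if_pos]
    exact PySem.List.foldl_append_singleton files_data []
  by_cases h2 : media_type = "document"
  · subst h2
    simp [filter_files_by_type, filter_files_by_type_alt,
      PySem.List.foldl_append_if_eq_filter]
    exact List.filter_congr fun f _ => by simpa using (labels_document _).symm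
  by_cases h3 : media_type = "image"
  · subst h3
    simp [filter_files_by_type, filter_files_by_type_alt,
      PySem.List.foldl_append_if_eq_filter]
    exact List.filter_congr fun f _ => by simpa using (labels_image _).symm
  by_cases h4 : media_type = "video"
  · subst h4
    simp [filter_files_by_type, filter_files_by_type_alt,
      PySem.List.foldl_append_if_eq_filter]
    exact List.filter_congr fun f _ => by simpa using (labels_video _).symm
  by_cases h5 : media_type = "audio"
  · subst h5
    simp [filter_files_by_type, filter_files_by_type_alt,
      PySem.List.foldl_append_if_eq_filter]
    exact List.filter_congr fun f _ => by simpa using (labels_audio _).symm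
  by_cases h6 : media_type = "archive"
  · subst h6
    simp [filter_files_by_type, filter_files_by_type_alt,
      PySem.List.foldl_append_ite_eq_filter]
    exact List.filter_congr fun f _ => by simpa using (labels_archive _).symm
  · have hf : ∀ s : String, (labelsB s).contains media_type = false := by
      intro s
      rw [Bool.eq_false_iff]
      intro hc
      have hmem : media_type ∈ labelsB s := by simpa using hc
      rcases labels_subset s media_type hmem with h | h | h | h | h <;> simp_all
    simp [filter_files_by_type, filter_files_by_type_alt,
      h1, h2, h3, h4, h5, h6, List.foldl_fixed]
    intro a _
    simpa using hf ((PySem.Dict.mk a).getD "mime_type" "")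

-- ===== VERDICT (by name: the statement is the Claim_ definition above) =====
theorem filter_files_by_type_spec : Claim_equal_filter_files_by_type := by
  intro files_data media_type _
  exact filter_eq files_data media_type
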